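-- pv_equiv track=rewrite | github.com/eulersformula/Lintcode-LeetCode | Character_deletion.py | character_deletion
-- ===== SOURCE A (Python) =====
-- def character_deletion(str: str, sub: str) -> str:
--     # write your code here
--     if len(str) == 0 or len(sub) == 0:
--         return str
--     sub = set(sub) # 如果没有取set会导致 TIME LIMIT EXCEEDED
--     out = ''
--     for c in str:
--         if c in sub:
--             continue
--         out += c
--     return out
-- ===== SOURCE B (Python) =====
-- def character_deletion(str: str, sub: str) -> str:
--     # staged passes: for each character of sub, one replace pass deletes
--     # all its occurrences; order of passes does not affect the result
--     for c in sub: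
--         str = str.replace(c, '')
--     return str
-- ===== Notes on version B (the rewrite author's own statement) =====
-- stated objective: alternative
-- what changed: Instead of one pass over str testing membership in a set of sub, B loops over sub and performs one str.replace(c, '') pass per character, removing all occurrences of that character; no set and no membership branch remain.
import Mathlib
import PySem

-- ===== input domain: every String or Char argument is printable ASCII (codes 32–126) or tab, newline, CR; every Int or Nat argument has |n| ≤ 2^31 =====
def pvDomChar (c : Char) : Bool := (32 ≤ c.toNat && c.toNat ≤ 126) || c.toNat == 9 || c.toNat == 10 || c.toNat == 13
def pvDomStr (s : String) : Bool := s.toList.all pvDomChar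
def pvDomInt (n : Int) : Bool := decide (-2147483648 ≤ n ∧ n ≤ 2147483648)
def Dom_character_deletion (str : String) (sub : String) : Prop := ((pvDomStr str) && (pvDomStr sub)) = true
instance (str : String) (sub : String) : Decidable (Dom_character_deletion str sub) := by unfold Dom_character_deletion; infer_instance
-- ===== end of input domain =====

-- B deletes characters by staged passes: one replace-style pass over the string per character of sub (alternative decomposition, not claimed faster).


-- ===== PORT A =====
def character_deletion (str : String) (sub : String) : String :=
  if str.length = 0 ∨ sub.length = 0 then str
  else
    let subSet : PySem.Set Char := PySem.Set.ofList sub.toList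
    let out : List Char :=
      str.toList.foldl (fun out c => if subSet.contains c then out else out ++ [c]) []
    String.ofList out

-- ===== PORT B =====
-- for c in sub: str = str.replace(c, '')  — replace with a one-character pattern and empty
-- replacement deletes every occurrence of that character; each pass is ported exactly as
-- one filter pass over the current string.
def character_deletion_alt (str : String) (sub : String) : String :=
  sub.toList.foldl (fun s c => String.ofList (s.toList.filter (fun x => x ≠ c))) str

-- ===== PRECONDITION & SPEC =====
def Spec_character_deletion (str : String) (sub : String) (out : String) : Prop := out = character_deletion_alt str sub
instance (str : String) (sub : String) (out : String) : Decidable (Spec_character_deletion str sub out) := by unfold Spec_character_deletion; infer_instance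

-- ===== CLAIM (what is proved, stated in full; the proofs are below) =====
def Claim_equal_character_deletion : Prop := ∀ (str : String) (sub : String), Dom_character_deletion str sub → Spec_character_deletion str sub (character_deletion str sub)

-- ===== LEMMAS AND PROOFS =====

-- A's skip-loop is a filter of the complement
theorem pv_foldl_skip_if (p : Char → Bool) :
    ∀ (l acc : List Char),
      l.foldl (fun out c => if p c then out else out ++ [c]) acc
        = acc ++ l.filter (fun c => !p c) := by
  intro l
  induction l with
  | nil => simp
  | cons c t ih =>
    intro acc
    by_cases h : p c = true <;> simp [h, ih]

-- A's set contains exactly the characters of sub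
theorem pv_set_contains (sub : List Char) (c : Char) :
    (PySem.Set.ofList sub).contains c = decide (c ∈ sub) := by
  simp [PySem.Set.mem_ofList]

-- B's staged filter passes amount to one filter by non-membership
theorem pv_foldl_filter (t : List Char) :
    ∀ (s : String),
      t.foldl (fun s c => String.ofList (s.toList.filter (fun x => x ≠ c))) s
        = String.ofList (s.toList.filter (fun x => decide (x ∉ t))) := by
  induction t with
  | nil => intro s; simp [String.ofList_toList]
  | cons c t ih =>
    intro s
    simp only [List.foldl_cons, ih]
    congr 1
    rw [String.toList_ofList, List.filter_filter]
    apply List.filter_congr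
    intro x _
    by_cases hx : x = c <;> simp [hx]

-- ===== VERDICT (by name: the statement is the Claim_ definition above) =====
theorem character_deletion_spec : Claim_equal_character_deletion := by
  intro str sub _
  show character_deletion str sub = character_deletion_alt str sub
  unfold character_deletion character_deletion_alt
  rw [pv_foldl_filter]
  split
  · rename_i h
    rcases h with h | h
    · have hnil : str.toList = [] :=
        List.length_eq_zero_iff.mp (by simpa using h)
      simp [hnil]
      exact (String.toList_eq_nil_iff.mp hnil).symm ▸ rfl
    · have hs : sub.toList = [] :=
        List.length_eq_zero_iff.mp (by simpa using h)
      simp [hs, String.ofList_toList]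
  · simp only [pv_set_contains, pv_foldl_skip_if, List.nil_append]
    congr 1
    apply List.filter_congr
    intro x _
    simp
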